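-- pv_equiv track=rewrite | github.com/calvinchankf/GoogleKickStart | 2020/G/b.py | f
-- ===== SOURCE A (Python) =====
-- def f(mat):
--     N = len(mat)
--     res = 0
--     heads = set()
--     for i in range(N):
--         heads.add((0, i))
--         heads.add((i, 0))
--     for i, j in heads:
--         diagSum = 0
--         _i, _j = i, j
--         while _i < N and _j < N:
--             diagSum += mat[_i][_j]
--             _i += 1
--             _j += 1
--         res = max(res, diagSum)
--     return res
-- ===== SOURCE B (Python) =====
-- def f(mat):
--     N = len(mat)
--     d = {}
--     for i in range(N):
--         for j in range(N):
--             k = i - j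
--             d[k] = d.get(k, 0) + mat[i][j]
--     res = 0
--     for v in d.values():
--         res = max(res, v)
--     return res
-- ===== Notes on version B (the rewrite author's own statement) =====
-- stated objective: alternative
-- what changed: Instead of building a set of diagonal head cells and re-walking each diagonal with a while loop, B makes one nested pass over all cells, accumulating each cell into a dict keyed by the diagonal invariant i - j, and then takes the max of the dict's values seeded with 0.
import Mathlib
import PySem

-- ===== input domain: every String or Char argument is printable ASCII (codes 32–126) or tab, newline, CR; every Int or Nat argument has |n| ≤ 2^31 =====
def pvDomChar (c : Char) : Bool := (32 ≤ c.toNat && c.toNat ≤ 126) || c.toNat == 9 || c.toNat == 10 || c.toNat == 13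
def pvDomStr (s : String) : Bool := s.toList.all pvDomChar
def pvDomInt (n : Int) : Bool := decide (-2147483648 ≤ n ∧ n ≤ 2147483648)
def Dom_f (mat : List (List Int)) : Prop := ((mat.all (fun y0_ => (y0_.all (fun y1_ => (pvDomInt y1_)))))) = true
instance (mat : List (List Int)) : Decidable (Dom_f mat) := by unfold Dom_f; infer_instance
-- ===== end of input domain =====

-- B replaces A's head-set plus per-diagonal while-loop walk by one nested pass over all cells
-- grouping them into a dict keyed by the diagonal invariant i - j, then a max over the dict's
-- values seeded with 0 (alternative decomposition; same O(N^2) cost).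

-- ===== PORT A =====
-- the 'while _i < N and _j < N' loop of A (state: _i, _j, diagSum)
def fDiag (mat : List (List Int)) (N : Int) (i j acc : Int) : Int :=
  if _h : i < N ∧ j < N then
    fDiag mat N (i + 1) (j + 1) (acc + PySem.List.pyGetD (PySem.List.pyGetD mat i []) j 0)
  else acc
termination_by (N - i).toNat
decreasing_by omega

def f (mat : List (List Int)) : Int :=
  let N : Int := PySem.List.len mat
  let heads : PySem.Set (Int × Int) :=
    (PySem.List.pyRange 0 N 1).foldl
      (fun s i => PySem.Set.add (PySem.Set.add s ((0 : Int), i)) (i, (0 : Int)))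
      PySem.Set.empty
  -- iterating the Python set computes a max, which is insensitive to the set's order
  heads.foldl (fun res p => max res (fDiag mat N p.1 p.2 0)) 0

-- ===== PORT B =====
def f_alt (mat : List (List Int)) : Int :=
  let N : Int := PySem.List.len mat
  let d : PySem.Dict Int Int :=
    (PySem.List.pyRange 0 N 1).foldl
      (fun d i =>
        (PySem.List.pyRange 0 N 1).foldl
          (fun d j =>
            d.insert (i - j)
              (d.getD (i - j) 0 + PySem.List.pyGetD (PySem.List.pyGetD mat i []) j 0))
          d)
      PySem.Dict.empty
  (PySem.Dict.values d).foldl (fun res v => max res v) 0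

-- ===== PRECONDITION & SPEC =====
-- Pre_ excludes exactly the ragged matrices with a row shorter than the number of rows,
-- on which the Python A (and B alike) raises IndexError.
def Pre_f (mat : List (List Int)) : Prop := ∀ row ∈ mat, mat.length ≤ row.length
instance (mat : List (List Int)) : Decidable (Pre_f mat) := by unfold Pre_f; infer_instance

def pvWitness_f : List (List Int) := [[1, -2], [3, 4]]

def Spec_f (mat : List (List Int)) (out : Int) : Prop := out = f_alt mat
instance (mat : List (List Int)) (out : Int) : Decidable (Spec_f mat out) := by unfold Spec_f; infer_instance

-- ===== CLAIM (what is proved, stated in full; the proofs are below) =====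
def Claim_equal_f : Prop := ∀ (mat : List (List Int)), Dom_f mat → Pre_f mat → Spec_f mat (f mat)

-- ===== LEMMAS AND PROOFS =====

-- value of cell (i, j) as both ports read it
def cellVal (mat : List (List Int)) (i j : Int) : Int :=
  PySem.List.pyGetD (PySem.List.pyGetD mat i []) j 0

-- sum along the descending diagonal with key k = i - j (rows max k 0 .. min N (N + k))
def diagSum (mat : List (List Int)) (N k : Int) : Int :=
  ((PySem.List.pyRange (max k 0) (min N (N + k)) 1).map
    (fun r => cellVal mat r (r - k))).sum

-- A's while loop computes the tail of a diagonal sum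
theorem fDiag_eq (mat : List (List Int)) (N : Int) :
    ∀ (n : Nat) (i j acc : Int), (N - i).toNat = n →
      fDiag mat N i j acc
        = acc + ((PySem.List.pyRange i (min N (N + (i - j))) 1).map
            (fun r => cellVal mat r (r - (i - j)))).sum := by
  intro n
  induction n with
  | zero =>
    intro i j acc hn
    rw [fDiag, dif_neg (show ¬ (i < N ∧ j < N) by omega),
      PySem.List.pyRange_one_eq_nil (by omega)]
    simp
  | succ m ih =>
    intro i j acc hn
    by_cases h : i < N ∧ j < N
    · rw [fDiag, dif_pos h, ih (i + 1) (j + 1) _ (by omega)]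
      simp only [show i + 1 - (j + 1) = i - j from by ring]
      rw [PySem.List.pyRange_one_cons (show i < min N (N + (i - j)) by omega)]
      simp only [List.map_cons, List.sum_cons, show i - (i - j) = j from by ring]
      show acc + cellVal mat i j + _ = acc + (cellVal mat i j + _)
      ring
    · rw [fDiag, dif_neg h, PySem.List.pyRange_one_eq_nil (by omega)]
      simp

-- inner filtered sum over one row

-- the filtered sum over one row of B's grouping
theorem innerSum (mat : List (List Int)) (N : Int) (i k : Int) :
    (((PySem.List.pyRange 0 N 1).filter (fun j => i - j == k)).map
      (fun j => cellVal mat i j)).sum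
      = if 0 ≤ i - k ∧ i - k < N then cellVal mat i (i - k) else 0 := by
  have hcong : ((PySem.List.pyRange 0 N 1).filter (fun j => i - j == k))
      = ((PySem.List.pyRange 0 N 1).filter (fun j => j == i - k)) := by
    apply List.filter_congr
    intro j _
    by_cases h : j = i - k
    · simp [h, show i - (i - k) = k from by ring]
    · simp [h, show i - j ≠ k from by omega]
  rw [hcong, List.filter_beq]
  by_cases hmem : 0 ≤ i - k ∧ i - k < N
  · rw [List.count_eq_one_of_mem (PySem.List.nodup_pyRange_one 0 N)
      (PySem.List.mem_pyRange_one.mpr (by omega))]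
    rw [if_pos hmem]
    simp
  · rw [List.count_eq_zero_of_not_mem (by
      intro hc
      exact hmem (by
        have := PySem.List.mem_pyRange_one.mp hc
        omega))]
    rw [if_neg hmem]
    simp

-- grouping all cells by key and summing one key gives the diagonal sum
theorem G_eq (mat : List (List Int)) (N k : Int) (hk1 : -N < k) (hk2 : k < N) :
    ((((PySem.List.pyRange 0 N 1).flatMap
        (fun i => (PySem.List.pyRange 0 N 1).map (fun j => (i, j)))).filter
          (fun p => p.1 - p.2 == k)).map (fun p => cellVal mat p.1 p.2)).sum
      = diagSum mat N k := by
  rw [List.filter_flatMap]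
  simp only [List.filter_map, Function.comp_def]
  rw [List.map_flatMap]
  simp only [List.map_map, Function.comp_def]
  rw [List.flatMap_def, List.sum_flatten]
  simp only [List.map_map, Function.comp_def]
  have hrow : ∀ i : Int,
      ((List.filter (fun j => i - j == k) (PySem.List.pyRange 0 N 1)).map
        (fun j => cellVal mat i j)).sum
        = if 0 ≤ i - k ∧ i - k < N then cellVal mat i (i - k) else 0 :=
    fun i => innerSum mat N i k
  rw [List.map_congr_left (fun i _ => hrow i)]
  -- split the outer range at max k 0 and min N (N + k)
  rw [PySem.List.pyRange_one_append 0 (max k 0) N (by omega) (by omega),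
    PySem.List.pyRange_one_append (max k 0) (min N (N + k)) N (by omega) (by omega)]
  simp only [List.map_append, List.sum_append]
  have hleft : ∀ i ∈ PySem.List.pyRange 0 (max k 0) 1,
      (if 0 ≤ i - k ∧ i - k < N then cellVal mat i (i - k) else 0) = 0 := by
    intro i hi
    have := PySem.List.mem_pyRange_one.mp hi
    rw [if_neg (by omega)]
  have hright : ∀ i ∈ PySem.List.pyRange (min N (N + k)) N 1,
      (if 0 ≤ i - k ∧ i - k < N then cellVal mat i (i - k) else 0) = 0 := by
    intro i hi
    have := PySem.List.mem_pyRange_one.mp hi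
    rw [if_neg (by omega)]
  have hmid : ∀ i ∈ PySem.List.pyRange (max k 0) (min N (N + k)) 1,
      (if 0 ≤ i - k ∧ i - k < N then cellVal mat i (i - k) else 0)
        = cellVal mat i (i - k) := by
    intro i hi
    have := PySem.List.mem_pyRange_one.mp hi
    rw [if_pos (by omega)]
  rw [List.map_congr_left hleft, List.map_congr_left hright, List.map_congr_left hmid]
  simp [diagSum]

-- accumulating into a dict: final value at key k is the sum over entries with that key
theorem getD_foldl_insert_add {β : Type} (key : β → Int) (g : β → Int) (k : Int) :
    ∀ (l : List β) (d : PySem.Dict Int Int),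
      (l.foldl (fun d x => d.insert (key x) (d.getD (key x) 0 + g x)) d).getD k 0
        = d.getD k 0 + ((l.filter (fun x => key x == k)).map g).sum := by
  intro l
  induction l with
  | nil => intro d; simp
  | cons x t ih =>
    intro d
    simp only [List.foldl_cons, ih, List.filter_cons]
    by_cases h : key x = k
    · simp [h]
      ring
    · simp [h, PySem.Dict.getD_insert, Ne.symm h]

theorem mem_keysA (N k : Int) :
    k ∈ (PySem.Set.ofList ((PySem.List.pyRange 0 N 1).flatMap
        (fun i => [((0:Int), i), (i, (0:Int))]))).map (fun p => p.1 - p.2)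
      ↔ (0 < N ∧ -N < k ∧ k < N) := by
  simp only [List.mem_map, PySem.Set.mem_ofList, List.mem_flatMap,
    PySem.List.mem_pyRange_one, List.mem_cons, List.not_mem_nil, or_false]
  constructor
  · rintro ⟨p, ⟨i, hi, hp | hp⟩, hkey⟩ <;> (subst hp; simp at hkey ⊢; omega)
  · rintro ⟨h0, h1, h2⟩
    by_cases hk : 0 ≤ k
    · exact ⟨(k, 0), ⟨k, by omega, Or.inr rfl⟩, by simp⟩
    · exact ⟨(0, -k), ⟨-k, by omega, Or.inl rfl⟩, by simp⟩

theorem nodup_keysA (N : Int) :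
    ((PySem.Set.ofList ((PySem.List.pyRange 0 N 1).flatMap
        (fun i => [((0:Int), i), (i, (0:Int))]))).map (fun p => p.1 - p.2)).Nodup := by
  apply List.Nodup.map_on _ (PySem.Set.nodup_ofList _)
  intro p hp q hq hkey
  rw [PySem.Set.mem_ofList] at hp hq
  simp only [List.mem_flatMap, PySem.List.mem_pyRange_one, List.mem_cons,
    List.not_mem_nil, or_false] at hp hq
  obtain ⟨i, hi, hp | hp⟩ := hp <;> obtain ⟨i', hi', hq | hq⟩ := hq <;>
    (subst hp; subst hq; simp at hkey ⊢; omega)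

theorem mem_keysB (N k : Int) :
    k ∈ PySem.Set.ofList (((PySem.List.pyRange 0 N 1).flatMap
        (fun i => (PySem.List.pyRange 0 N 1).map (fun j => (i, j)))).map
          (fun p => p.1 - p.2))
      ↔ (0 < N ∧ -N < k ∧ k < N) := by
  simp only [PySem.Set.mem_ofList, List.mem_map, List.mem_flatMap,
    PySem.List.mem_pyRange_one]
  constructor
  · rintro ⟨p, ⟨i, hi, j, hj, hp⟩, hkey⟩
    subst hp; simp at hkey; omega
  · rintro ⟨h0, h1, h2⟩
    exact ⟨(max k 0, max (-k) 0), ⟨max k 0, by omega, max (-k) 0, by omega, rfl⟩, by dsimp only; omega⟩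

theorem main (mat : List (List Int)) : f mat = f_alt mat := by
  unfold f f_alt
  simp only []
  set N : Int := PySem.List.len mat with hN
  set cells : List (Int × Int) :=
    (PySem.List.pyRange 0 N 1).flatMap
      (fun i => (PySem.List.pyRange 0 N 1).map (fun j => (i, j))) with hcells
  set listH : List (Int × Int) :=
    (PySem.List.pyRange 0 N 1).flatMap (fun i => [((0:Int), i), (i, (0:Int))]) with hlistH
  -- A's head set is Set.ofList listH
  have hheads : (PySem.List.pyRange 0 N 1).foldl
      (fun s i => PySem.Set.add (PySem.Set.add s ((0 : Int), i)) (i, (0 : Int)))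
      PySem.Set.empty = PySem.Set.ofList listH := by
    rw [PySem.Set.ofList_eq_foldl, hlistH, List.foldl_flatMap]
    rfl
  -- B's dict is a single fold over all cells
  have hd : (PySem.List.pyRange 0 N 1).foldl
      (fun d i =>
        (PySem.List.pyRange 0 N 1).foldl
          (fun d j =>
            d.insert (i - j)
              (d.getD (i - j) 0 + PySem.List.pyGetD (PySem.List.pyGetD mat i []) j 0))
          d)
      PySem.Dict.empty
      = cells.foldl
          (fun d p => d.insert (p.1 - p.2) (d.getD (p.1 - p.2) 0 + cellVal mat p.1 p.2))
          PySem.Dict.empty := by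
    rw [hcells, List.foldl_flatMap]
    congr 1
    funext d i
    rw [List.foldl_map]
    rfl
  rw [hheads, hd]
  set dcells := cells.foldl
      (fun d p => d.insert (p.1 - p.2) (d.getD (p.1 - p.2) 0 + cellVal mat p.1 p.2))
      PySem.Dict.empty with hdc
  have hnodup : dcells.keys.Nodup := by
    rw [hdc]
    exact PySem.Dict.nodup_keys_foldl_insert_key cells (fun p => p.1 - p.2) _ _ (by simp)
  have hkeys : dcells.keys = PySem.Set.ofList (cells.map (fun p => p.1 - p.2)) := by
    rw [hdc, PySem.Dict.keys_foldl_insert_key cells (fun p => p.1 - p.2), PySem.Set.ofList_eq_foldl]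
    rfl
  rw [PySem.Dict.values_eq_map_keys dcells hnodup 0, List.foldl_map]
  -- the A side as a fold over the mapped keys
  have hA : (PySem.Set.ofList listH).foldl (fun res p => max res (fDiag mat N p.1 p.2 0)) 0
      = ((PySem.Set.ofList listH).map (fun p : Int × Int => p.1 - p.2)).foldl
          (fun r k => max r (diagSum mat N k)) 0 := by
    rw [List.foldl_map]
    apply PySem.List.foldl_congr_mem
    intro acc p hp
    rw [PySem.Set.mem_ofList, hlistH] at hp
    simp only [List.mem_flatMap, PySem.List.mem_pyRange_one, List.mem_cons,
      List.not_mem_nil, or_false] at hp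
    obtain ⟨i, hi, hp | hp⟩ := hp <;> subst hp
    · rw [fDiag_eq mat N (N - 0).toNat 0 i 0 rfl]
      simp only [diagSum]
      rw [show max ((0:Int) - i) 0 = 0 from by omega]
      simp
    · rw [fDiag_eq mat N (N - i).toNat i 0 0 rfl]
      simp only [diagSum]
      rw [show max (i - (0:Int)) 0 = i from by omega]
      simp
  rw [hA]
  -- the B side: replace each getD by diagSum
  have hB : (dcells.keys).foldl (fun r k => max r (dcells.getD k 0)) 0
      = (dcells.keys).foldl (fun r k => max r (diagSum mat N k)) 0 := by
    apply PySem.List.foldl_congr_mem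
    intro acc k hk
    rw [hkeys] at hk
    have hbound := (mem_keysB N k).mp (by rw [hcells] at hk; exact hk)
    have hget : dcells.getD k 0 = diagSum mat N k := by
      rw [hdc, getD_foldl_insert_add (fun p : Int × Int => p.1 - p.2)
        (fun p => cellVal mat p.1 p.2) k cells PySem.Dict.empty]
      rw [hcells]
      rw [G_eq mat N k (by omega) (by omega)]
      simp
    rw [hget]
  rw [hB]
  -- the two key lists are permutations of each other
  have hperm : ((PySem.Set.ofList listH).map (fun p : Int × Int => p.1 - p.2)).Perm
      (dcells.keys) := by
    rw [hkeys]
    refine (List.perm_ext_iff_of_nodup ?_ ?_).mpr ?_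
    · exact nodup_keysA N
    · exact PySem.Set.nodup_ofList _
    · intro a
      exact (mem_keysA N a).trans (mem_keysB N a).symm
  exact @List.Perm.foldl_eq _ _ (fun r k => max r (diagSum mat N k)) _ _
    ⟨fun b a₁ a₂ => by
      show max (max b (diagSum mat N a₁)) (diagSum mat N a₂)
        = max (max b (diagSum mat N a₂)) (diagSum mat N a₁)
      rw [max_right_comm]⟩ hperm 0

-- ===== VERDICT (by name: the statement is the Claim_ definition above) =====
theorem f_spec : Claim_equal_f := by
  intro mat _hdom _hpre
  unfold Spec_f
  exact main mat
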